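-- pv_equiv track=rewrite | github.com/chenshixu/PTLVD | normalization/delete_code.py | get_lindex_xin
-- ===== SOURCE A (Python) =====
-- def get_lindex_xin(line,indexs):
--     is_in_yinhao = False
--     out_start = []
--     out_end = []
--     for i in range(len(line)):
--         # 判断i 是否在引号字符串内
--         flag = False
--         for index in indexs:
--             if i in index:
--                 flag = True
--                 break
--         if flag == True:
--             is_in_yinhao = not is_in_yinhao
--         if not is_in_yinhao and line[i:i+2] == '/*':
--             out_start.append(i)
--         if not is_in_yinhao and line[i:i+2] == '*/':
--             out_end.append(i)
--
--
--     return out_start, out_end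
-- ===== SOURCE B (Python) =====
-- def get_lindex_xin(line, indexs):
--     n = len(line)
--     # mark union membership, then accumulate a running parity table
--     mark = [False] * n
--     for index in indexs:
--         for k in index:
--             if 0 <= k < n:
--                 mark[k] = True
--     par = []
--     p = 0
--     for b in mark:
--         if b:
--             p = 1 - p
--         par.append(p)
--     # targeted scans: jump from marker to marker instead of testing every char
--     out_start = []
--     i = line.find('/*')
--     while i != -1:
--         if par[i] == 0:
--             out_start.append(i)
--         i = line.find('/*', i + 1)
--     out_end = []
--     i = line.find('*/')
--     while i != -1:
--         if par[i] == 0: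
--             out_end.append(i)
--         i = line.find('*/', i + 1)
--     return out_start, out_end
-- ===== Notes on version B (the rewrite author's own statement) =====
-- stated objective: faster
-- what changed: Replaces the per-character loop (which scans every index list for membership at each position and slices a 2-char substring at each position) by a precomputed union-membership/prefix-parity table followed by targeted str.find scans that jump from marker to marker.
import Mathlib
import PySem

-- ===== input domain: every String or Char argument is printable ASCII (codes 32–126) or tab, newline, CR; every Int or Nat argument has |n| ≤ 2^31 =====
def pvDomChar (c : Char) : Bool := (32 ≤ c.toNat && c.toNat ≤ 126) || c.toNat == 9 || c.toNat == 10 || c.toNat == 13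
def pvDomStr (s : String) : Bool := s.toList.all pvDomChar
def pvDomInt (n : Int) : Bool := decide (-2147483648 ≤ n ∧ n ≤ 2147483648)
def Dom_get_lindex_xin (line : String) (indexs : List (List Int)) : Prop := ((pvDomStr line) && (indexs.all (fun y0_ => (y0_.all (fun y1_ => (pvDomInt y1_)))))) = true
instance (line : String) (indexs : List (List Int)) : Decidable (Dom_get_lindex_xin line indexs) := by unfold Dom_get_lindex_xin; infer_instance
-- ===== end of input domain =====

-- B replaces A's per-character membership scan + substring test by a precomputed
-- union-membership/prefix-parity table followed by targeted find() scans (faster).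

-- ===== PORT A =====
-- literal transliteration of A: one pass over range(len(line)) carrying the
-- is_in_yinhao flag and the two output lists; the inner for/break over indexs is `any`.
def get_lindex_xin (line : String) (indexs : List (List Int)) : List Int × List Int :=
  let s := line.toList
  let st := (List.range s.length).foldl
    (fun (acc : Bool × List Int × List Int) (i : Nat) =>
      let flag := indexs.any (fun index => decide ((i : Int) ∈ index))
      let inq := if flag then !acc.1 else acc.1
      let os := if !inq && decide (PySem.List.slice s (some (i : Int)) (some ((i : Int) + 2)) = ['/', '*'])
                then acc.2.1 ++ [(i : Int)] else acc.2.1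
      let oe := if !inq && decide (PySem.List.slice s (some (i : Int)) (some ((i : Int) + 2)) = ['*', '/'])
                then acc.2.2 ++ [(i : Int)] else acc.2.2
      (inq, os, oe))
    (false, [], [])
  (st.2.1, st.2.2)

-- ===== PORT B =====
-- facts about Chars.findFrom the scan loop's termination needs (cited in decreasing_by)
theorem pv_findFrom_big (s sub : List Char) (k : Nat) (h : s.length < k) :
    PySem.Chars.findFrom s sub (k : Int) none = -1 := by
  unfold PySem.Chars.findFrom
  simp only
  rw [if_neg (by omega : ¬ ((k : Int) < 0)), if_pos (by omega : (s.length : Int) < (k : Int))]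

theorem pv_findFrom_bounds (s sub : List Char) (k : Nat)
    (h : PySem.Chars.findFrom s sub (k : Int) none ≠ -1) :
    k ≤ (PySem.Chars.findFrom s sub (k : Int) none).toNat ∧
      (PySem.Chars.findFrom s sub (k : Int) none).toNat ≤ s.length := by
  by_cases hk : k ≤ s.length
  · obtain ⟨h1, _, _⟩ := PySem.Chars.findFrom_natCast_spec s sub k hk h
    have h2 := PySem.Chars.findFrom_natCast s sub k hk
    have h3 := PySem.Chars.find_le_length (s.drop k) sub
    rw [h2] at h1 ⊢
    rw [h2] at h
    simp only [List.length_drop] at h3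
    split at h
    · exact absurd rfl h
    · constructor <;> omega
  · exact absurd (pv_findFrom_big s sub k (by omega)) h

-- transliteration of Source B's `while i != -1` find-loop (i advances to find(sub, i+1))
def pvScan (s sub : List Char) (par : List Int) (start : Nat) : List Int :=
  if h : PySem.Chars.findFrom s sub (start : Int) none = -1 then []
  else
    (if PySem.List.pyGetD par (PySem.Chars.findFrom s sub (start : Int) none) 0 = 0
       then [PySem.Chars.findFrom s sub (start : Int) none] else [])
    ++ pvScan s sub par ((PySem.Chars.findFrom s sub (start : Int) none).toNat + 1)
termination_by s.length + 1 - start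
decreasing_by
  obtain ⟨h1, h2⟩ := pv_findFrom_bounds s sub start h
  omega

-- literal transliteration of B: mark the union, accumulate the parity table, two find-scans
def get_lindex_xin_alt (line : String) (indexs : List (List Int)) : List Int × List Int :=
  let s := line.toList
  let n := s.length
  let mark := indexs.foldl (fun m index =>
      index.foldl (fun m k =>
        if 0 ≤ k ∧ k < (n : Int) then PySem.List.pySetD m k true else m) m)
    (List.replicate n false)
  let par := (mark.foldl (fun (st : Int × List Int) b =>
      let p := if b then 1 - st.1 else st.1
      (p, st.2 ++ [p])) (0, [])).2
  (pvScan s ['/', '*'] par 0, pvScan s ['*', '/'] par 0)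

-- ===== PRECONDITION & SPEC =====
def Spec_get_lindex_xin (line : String) (indexs : List (List Int)) (out : List Int × List Int) : Prop := out = get_lindex_xin_alt line indexs
instance (line : String) (indexs : List (List Int)) (out : List Int × List Int) : Decidable (Spec_get_lindex_xin line indexs out) := by unfold Spec_get_lindex_xin; infer_instance

-- ===== CLAIM (what is proved, stated in full; the proofs are below) =====
def Claim_equal_get_lindex_xin : Prop := ∀ (line : String) (indexs : List (List Int)), Dom_get_lindex_xin line indexs → Spec_get_lindex_xin line indexs (get_lindex_xin line indexs)

-- ===== LEMMAS AND PROOFS =====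

-- i toggles the quote flag in A iff some index list contains it
def pvTogl (indexs : List (List Int)) (i : Nat) : Bool :=
  indexs.any (fun index => decide ((i : Int) ∈ index))

-- number of toggle positions among 0..n-1
def pvCnt (indexs : List (List Int)) (n : Nat) : Nat :=
  (List.range n).countP (pvTogl indexs)

-- the common characterisation: positions i with sub at i and even toggle count over 0..i
def pvSpec (s : List Char) (indexs : List (List Int)) (sub : List Char) : List Int :=
  ((List.range s.length).filter
    (fun i => decide (sub <+: s.drop i) && decide (pvCnt indexs (i + 1) % 2 = 0))).map
    (fun (i : Nat) => (i : Int))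

-- pvSpec cut off at n
def pvSpecN (s : List Char) (indexs : List (List Int)) (sub : List Char) (n : Nat) : List Int :=
  ((List.range n).filter
    (fun i => decide (sub <+: s.drop i) && decide (pvCnt indexs (i + 1) % 2 = 0))).map
    (fun (i : Nat) => (i : Int))

theorem pv_slice_eq (s : List Char) (i : Nat) (a b : Char) :
    decide (PySem.List.slice s (some (i : Int)) (some ((i : Int) + 2)) = [a, b]) =
      decide ([a, b] <+: s.drop i) := by
  have h : PySem.List.slice s (some (i:Int)) (some ((i:Int)+2)) = (s.drop i).take 2 := by
    exact_mod_cast PySem.List.slice_natCast_add s i 2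
  rw [h]
  apply decide_eq_decide.mpr
  rw [List.prefix_iff_eq_take]; simp [eq_comm]

theorem pv_cnt_succ (indexs : List (List Int)) (n : Nat) :
    pvCnt indexs (n + 1) = pvCnt indexs n + (if pvTogl indexs n then 1 else 0) := by
  unfold pvCnt
  rw [List.range_succ, List.countP_append]; simp [List.countP_singleton, pvTogl]

theorem pv_specN_succ (s : List Char) (indexs : List (List Int)) (sub : List Char) (n : Nat) :
    pvSpecN s indexs sub (n + 1) =
      pvSpecN s indexs sub n ++
        (if decide (sub <+: s.drop n) && decide (pvCnt indexs (n + 1) % 2 = 0)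
         then [(n : Int)] else []) := by
  unfold pvSpecN
  rw [List.range_succ, List.filter_append, List.map_append]
  congr 1
  simp only [List.filter_singleton]
  split <;> rename_i hh <;> simp [hh]

theorem pv_not_decide (x : Nat) : (!decide (x % 2 = 1)) = decide (x % 2 = 0) := by
  rcases Nat.mod_two_eq_zero_or_one x with h | h <;> simp [h]

theorem pv_flip (x : Nat) : decide ((x + 1) % 2 = 1) = !decide (x % 2 = 1) := by
  rcases Nat.mod_two_eq_zero_or_one x with h | h
  · have h1 : (x + 1) % 2 = 1 := by omega
    simp [h, h1]
  · have h1 : (x + 1) % 2 = 0 := by omega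
    simp [h, h1]

theorem pv_decide_zero_succ (x : Nat) : decide ((x + 1) % 2 = 0) = decide (x % 2 = 1) := by
  rcases Nat.mod_two_eq_zero_or_one x with h | h
  · have h1 : (x + 1) % 2 = 1 := by omega
    simp [h, h1]
  · have h1 : (x + 1) % 2 = 0 := by omega
    simp [h, h1]

theorem pv_A_inv (s : List Char) (indexs : List (List Int)) (n : Nat) :
    (List.range n).foldl
      (fun (acc : Bool × List Int × List Int) (i : Nat) =>
        let flag := indexs.any (fun index => decide ((i : Int) ∈ index))
        let inq := if flag then !acc.1 else acc.1
        let os := if !inq && decide (PySem.List.slice s (some (i : Int)) (some ((i : Int) + 2)) = ['/', '*'])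
                  then acc.2.1 ++ [(i : Int)] else acc.2.1
        let oe := if !inq && decide (PySem.List.slice s (some (i : Int)) (some ((i : Int) + 2)) = ['*', '/'])
                  then acc.2.2 ++ [(i : Int)] else acc.2.2
        (inq, os, oe))
      (false, [], []) =
    (decide (pvCnt indexs n % 2 = 1), pvSpecN s indexs ['/', '*'] n, pvSpecN s indexs ['*', '/'] n) := by
  induction n with
  | zero => simp [pvCnt, pvSpecN]
  | succ n ih =>
    rw [List.range_succ, List.foldl_append, ih]
    simp only [List.foldl_cons, List.foldl_nil, pv_slice_eq]
    rw [pv_specN_succ, pv_specN_succ]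
    have ht : (indexs.any (fun index => decide ((n : Int) ∈ index))) = pvTogl indexs n := rfl
    have hc := pv_cnt_succ indexs n
    cases htg : pvTogl indexs n
    · have hcc : pvCnt indexs (n + 1) = pvCnt indexs n := by rw [hc, htg]; simp
      rw [ht, htg, hcc]
      simp only [Bool.false_eq_true, if_false]
      refine Prod.ext rfl (Prod.ext ?_ ?_) <;>
        · simp only []
          rw [pv_not_decide, Bool.and_comm]
          split <;> simp
    · have hcc : pvCnt indexs (n + 1) = pvCnt indexs n + 1 := by rw [hc, htg]; simp
      rw [ht, htg, hcc]
      simp only [if_true]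
      refine Prod.ext ?_ (Prod.ext ?_ ?_)
      · simp only []
        rw [pv_flip]
      all_goals
        simp only [Bool.not_not]
        rw [pv_decide_zero_succ, Bool.and_comm]
        split <;> simp

theorem pv_A_eq (line : String) (indexs : List (List Int)) :
    get_lindex_xin line indexs =
      (pvSpec line.toList indexs ['/', '*'], pvSpec line.toList indexs ['*', '/']) := by
  unfold get_lindex_xin
  simp only [pv_A_inv]
  rfl

-- ---- B-side: the mark list is the membership table of pvTogl ----
theorem pv_mark_inner_len (N : Nat) (idx : List Int) (m : List Bool) :
    (idx.foldl (fun m k =>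
      if 0 ≤ k ∧ k < (N : Int) then PySem.List.pySetD m k true else m) m).length = m.length := by
  induction idx generalizing m with
  | nil => rfl
  | cons k idx ih =>
    rw [List.foldl_cons, ih]
    split
    · rename_i hg
      rw [PySem.List.pySetD_of_nonneg _ _ hg.1, List.length_set]
    · rfl

theorem pv_mark_inner_get (N : Nat) (idx : List Int) (m : List Bool) (j : Nat)
    (hm : m.length = N) (hj : j < N) :
    ((idx.foldl (fun m k =>
      if 0 ≤ k ∧ k < (N : Int) then PySem.List.pySetD m k true else m) m)[j]?).getD false =
    ((m[j]?).getD false || decide ((j : Int) ∈ idx)) := by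
  induction idx generalizing m with
  | nil => simp
  | cons k idx ih =>
    rw [List.foldl_cons]
    have hstep : (((if 0 ≤ k ∧ k < (N : Int) then PySem.List.pySetD m k true else m))[j]?).getD false =
        ((m[j]?).getD false || decide ((j : Int) = k)) := by
      split
      · rename_i hg
        rw [PySem.List.pySetD_of_nonneg _ _ hg.1, List.getElem?_set]
        rcases eq_or_ne k.toNat j with he | hne
        · have : (j : Int) = k := by omega
          simp [he, hm ▸ hj, this]
        · have : ¬ ((j : Int) = k) := by rcases hg with ⟨hg1, _⟩; omega
          simp [hne, this]
      · rename_i hg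
        have : ¬ ((j : Int) = k) := by
          by_contra hc
          exact hg ⟨by omega, by omega⟩
        simp [this]
    have hlen : ((if 0 ≤ k ∧ k < (N : Int) then PySem.List.pySetD m k true else m)).length = N := by
      split
      · rename_i hg
        rw [PySem.List.pySetD_of_nonneg _ _ hg.1, List.length_set]; exact hm
      · exact hm
    rw [ih _ hlen, hstep]
    simp [Bool.or_assoc]

theorem pv_mark_outer_get (N : Nat) (ixs : List (List Int)) (m : List Bool) (j : Nat)
    (hm : m.length = N) (hj : j < N) :
    ((ixs.foldl (fun m index => index.foldl (fun m k =>
      if 0 ≤ k ∧ k < (N : Int) then PySem.List.pySetD m k true else m) m) m)[j]?).getD false =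
    ((m[j]?).getD false || ixs.any (fun index => decide ((j : Int) ∈ index))) := by
  induction ixs generalizing m with
  | nil => simp
  | cons idx ixs ih =>
    rw [List.foldl_cons, ih _ (by rw [pv_mark_inner_len]; exact hm),
        pv_mark_inner_get N idx m j hm hj]
    simp [Bool.or_assoc]

theorem pv_mark_len (N : Nat) (ixs : List (List Int)) (m : List Bool) :
    (ixs.foldl (fun m index => index.foldl (fun m k =>
      if 0 ≤ k ∧ k < (N : Int) then PySem.List.pySetD m k true else m) m) m).length = m.length := by
  induction ixs generalizing m with
  | nil => rfl
  | cons idx ixs ih => rw [List.foldl_cons, ih, pv_mark_inner_len]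

theorem pv_mark_eq (s : List Char) (indexs : List (List Int)) :
    (indexs.foldl (fun m index => index.foldl (fun m k =>
      if 0 ≤ k ∧ k < ((s.length : Nat) : Int) then PySem.List.pySetD m k true else m) m)
      (List.replicate s.length false)) =
    (List.range s.length).map (pvTogl indexs) := by
  apply List.ext_getElem?
  intro j
  rcases Nat.lt_or_ge j s.length with hj | hj
  · have hlen := pv_mark_len s.length indexs (List.replicate s.length false)
    rw [List.length_replicate] at hlen
    have hget := pv_mark_outer_get s.length indexs (List.replicate s.length false) j
      (by simp) hj
    rw [List.getElem?_replicate, if_pos hj] at hget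
    have hsome : (indexs.foldl (fun m index => index.foldl (fun m k =>
        if 0 ≤ k ∧ k < ((s.length : Nat) : Int) then PySem.List.pySetD m k true else m) m)
        (List.replicate s.length false))[j]? = some (pvTogl indexs j) := by
      rw [List.getElem?_eq_getElem (by rw [hlen]; exact hj)]
      rw [List.getElem?_eq_getElem (by rw [hlen]; exact hj)] at hget
      simp only [Option.getD_some] at hget
      rw [hget]
      simp [pvTogl]
    rw [hsome, List.getElem?_map, List.getElem?_range hj]
    rfl
  · have hlen := pv_mark_len s.length indexs (List.replicate s.length false)
    rw [List.length_replicate] at hlen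
    rw [List.getElem?_eq_none (by rw [hlen]; exact hj),
        List.getElem?_eq_none (by simp; exact hj)]

-- ---- B-side: the parity table ----
def pvParAux (p : Int) : List Bool → List Int
  | [] => []
  | b :: bs =>
    let p' := if b then 1 - p else p
    p' :: pvParAux p' bs

theorem pv_par_foldl (bs : List Bool) (p : Int) (acc : List Int) :
    (bs.foldl (fun (st : Int × List Int) b =>
      let q := if b then 1 - st.1 else st.1
      (q, st.2 ++ [q])) (p, acc)).2 = acc ++ pvParAux p bs := by
  induction bs generalizing p acc with
  | nil => simp [pvParAux]
  | cons b bs ih => simp [pvParAux, List.foldl_cons, ih]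

theorem pv_parAux_getElem? (bs : List Bool) (p : Int) (i : Nat) (h : i < bs.length) :
    (pvParAux p bs)[i]? =
      some (if ((bs.take (i + 1)).count true) % 2 = 1 then 1 - p else p) := by
  induction bs generalizing p i with
  | nil => simp at h
  | cons b bs ih =>
    cases i with
    | zero =>
      cases b <;> simp [pvParAux]
    | succ i =>
      have hi : i < bs.length := by simpa using h
      rw [List.take_succ_cons, List.count_cons]
      cases b
      · simp only [pvParAux, if_false, Bool.false_eq_true, List.getElem?_cons_succ]
        rw [ih p i hi]
        simp
      · simp only [pvParAux, if_true, List.getElem?_cons_succ]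
        rw [ih (1 - p) i hi]
        rcases Nat.mod_two_eq_zero_or_one ((bs.take (i + 1)).count true) with hp | hp
        · have h1 : ((bs.take (i + 1)).count true + 1) % 2 = 1 := by omega
          simp [hp, h1]
        · have h1 : ((bs.take (i + 1)).count true + 1) % 2 = 0 := by omega
          simp [hp, h1]

-- ---- B-side: the find-scan collects filtered occurrence positions ----
theorem pv_scan_eq (s sub : List Char) (par : List Int) (hsub : sub ≠ []) (start : Nat) :
    pvScan s sub par start =
      ((List.range' start (s.length - start)).filter
        (fun i => decide (sub <+: s.drop i) && (PySem.List.pyGetD par (i : Int) 0 == 0))).map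
        (fun (i : Nat) => (i : Int)) := by
  have H : ∀ (fuel start : Nat), s.length + 1 - start ≤ fuel →
      pvScan s sub par start =
        ((List.range' start (s.length - start)).filter
          (fun i => decide (sub <+: s.drop i) && (PySem.List.pyGetD par (i : Int) 0 == 0))).map
          (fun (i : Nat) => (i : Int)) := by
    intro fuel
    induction fuel with
    | zero =>
      intro start hf
      have hgt : s.length < start := by omega
      rw [pvScan, dif_pos (pv_findFrom_big s sub start hgt)]
      rw [show s.length - start = 0 by omega]
      rfl
    | succ fuel ih =>
      intro start hf
      rw [pvScan]
      split
      · rename_i hneg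
        rcases Nat.lt_or_ge s.length start with hgt | hle
        · rw [show s.length - start = 0 by omega]; rfl
        · have hnone := (PySem.Chars.findFrom_natCast_eq_neg_one_iff s sub start hle).mp hneg
          have : ((List.range' start (s.length - start)).filter
              (fun i => decide (sub <+: s.drop i) && (PySem.List.pyGetD par (i : Int) 0 == 0))) = [] := by
            apply List.filter_eq_nil_iff.mpr
            intro i hi
            have hmem := List.mem_range'_1.mp hi
            have hpre : ¬ sub <+: s.drop i := by
              intro hp
              apply hnone
              have heq : s.drop i = (s.drop start).drop (i - start) := by
                rw [List.drop_drop]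
                congr 1
                omega
              rw [heq] at hp
              exact hp.isInfix.trans (List.drop_suffix (i - start) (s.drop start)).isInfix
            simp [hpre]
          rw [this]
          rfl
      · rename_i hne
        obtain ⟨hb1, hb2⟩ := pv_findFrom_bounds s sub start hne
        set j := PySem.Chars.findFrom s sub (start : Int) none with hjdef
        have hle : start ≤ s.length := by omega
        obtain ⟨h1, h2, h3⟩ := PySem.Chars.findFrom_natCast_spec s sub start hle hne
        rw [← hjdef] at h1 h2 h3
        have hjlt : j.toNat < s.length := by
          have hl := h2.length_le
          rw [List.length_drop] at hl
          have : 0 < sub.length := List.length_pos_of_ne_nil hsub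
          omega
        have hjcast : j = ((j.toNat : Nat) : Int) := by
          have : (0 : Int) ≤ j := le_trans (Int.natCast_nonneg start) h1
          omega
        have e2 : List.range' start (s.length - start) =
            List.range' start (j.toNat - start) ++ List.range' j.toNat (s.length - j.toNat) := by
          have e := @List.range'_append_1 start (j.toNat - start) (s.length - j.toNat)
          rw [show start + (j.toNat - start) = j.toNat by omega,
              show (j.toNat - start) + (s.length - j.toNat) = s.length - start by omega] at e
          exact e.symm
        have hfilt1 : ((List.range' start (j.toNat - start)).filter
            (fun i => decide (sub <+: s.drop i) && (PySem.List.pyGetD par (i : Int) 0 == 0))) = [] := by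
          apply List.filter_eq_nil_iff.mpr
          intro i hi
          have hmem := List.mem_range'_1.mp hi
          have hpre := h3 i hmem.1 (by omega)
          simp [hpre]
        have e3 : List.range' j.toNat (s.length - j.toNat) =
            j.toNat :: List.range' (j.toNat + 1) (s.length - (j.toNat + 1)) := by
          rw [show s.length - j.toNat = (s.length - (j.toNat + 1)) + 1 by omega, List.range'_succ]
        rw [e2, List.filter_append, hfilt1, List.nil_append, e3]
        rw [List.filter_cons]
        have hih := ih (j.toNat + 1) (by omega)
        have hcast2 : ((j.toNat : Nat) : Int) = j := hjcast.symm
        have hcond : (decide (sub <+: s.drop j.toNat) &&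
            (PySem.List.pyGetD par ((j.toNat : Nat) : Int) 0 == 0)) =
            (PySem.List.pyGetD par j 0 == 0) := by
          rw [hcast2]; simp [h2]
        rw [hcond]
        by_cases hpar : PySem.List.pyGetD par j 0 = 0
        · rw [if_pos (show (PySem.List.pyGetD par j 0 == 0) = true by simp [hpar]),
              List.map_cons, if_pos hpar, hih, hcast2]
          rfl
        · rw [if_neg (show ¬ (PySem.List.pyGetD par j 0 == 0) = true by simp [hpar]),
              if_neg hpar, hih]
          simp
  exact H (s.length + 1 - start) start le_rfl

theorem pv_par_lookup (s : List Char) (indexs : List (List Int)) (i : Nat) (hi : i < s.length) :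
    (PySem.List.pyGetD (pvParAux 0 ((List.range s.length).map (pvTogl indexs))) ((i : Nat) : Int) 0 == 0) =
      decide (pvCnt indexs (i + 1) % 2 = 0) := by
  have hg := pv_parAux_getElem? ((List.range s.length).map (pvTogl indexs)) 0 i (by simpa using hi)
  have hgd : PySem.List.pyGetD (pvParAux 0 ((List.range s.length).map (pvTogl indexs))) ((i : Nat) : Int) 0 =
      (pvParAux 0 ((List.range s.length).map (pvTogl indexs)))[i]?.getD 0 := by
    rw [PySem.List.pyGetD_natCast, List.getD_eq_getElem?_getD]
  have hcnt : ((((List.range s.length).map (pvTogl indexs)).take (i + 1)).count true) =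
      pvCnt indexs (i + 1) := by
    rw [← List.map_take, List.take_range, Nat.min_eq_left (by omega)]
    rw [List.count_eq_countP, List.countP_map]
    apply List.countP_congr
    intro x _
    simp [Function.comp]
  rw [hgd, hg, hcnt]
  rcases Nat.mod_two_eq_zero_or_one (pvCnt indexs (i + 1)) with hp | hp <;> simp [hp]

theorem pv_B_eq (line : String) (indexs : List (List Int)) :
    get_lindex_xin_alt line indexs =
      (pvSpec line.toList indexs ['/', '*'], pvSpec line.toList indexs ['*', '/']) := by
  simp only [get_lindex_xin_alt]
  rw [pv_mark_eq, pv_par_foldl, List.nil_append]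
  rw [pv_scan_eq _ _ _ (by simp) 0, pv_scan_eq _ _ _ (by simp) 0]
  rw [Nat.sub_zero, ← List.range_eq_range']
  unfold pvSpec
  have hcong : ∀ sub : List Char,
      (List.filter (fun i => decide (sub <+: line.toList.drop i) &&
          (PySem.List.pyGetD (pvParAux 0 ((List.range line.toList.length).map (pvTogl indexs)))
            ((i : Nat) : Int) 0 == 0))
        (List.range line.toList.length)) =
      (List.filter (fun i => decide (sub <+: line.toList.drop i) &&
          decide (pvCnt indexs (i + 1) % 2 = 0))
        (List.range line.toList.length)) := by
    intro sub
    apply List.filter_congr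
    intro i hi
    rw [pv_par_lookup _ _ _ (List.mem_range.mp hi)]
  rw [hcong, hcong]

-- ===== VERDICT (by name: the statement is the Claim_ definition above) =====
theorem get_lindex_xin_spec : Claim_equal_get_lindex_xin := by
  intro line indexs _
  unfold Spec_get_lindex_xin
  rw [pv_A_eq, pv_B_eq]
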